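-- pv_equiv track=rewrite | github.com/luisrch594/regular_scripts | python/piramid_exercise.py | height_piramid
-- ===== SOURCE A (Python) =====
-- def height_piramid(quantity: int):
--     if (quantity%2!=0):
--         return 0
--     else:
--         height=0
--         limit_blocks=1
--         quantity_per_level=0
--         while (quantity>0):
--             quantity-=1
--             quantity_per_level+=1
--             if quantity_per_level==limit_blocks:
--                 limit_blocks+=1
--                 quantity_per_level=0
--                 height+=1
--
--         return height
-- ===== SOURCE B (Python) =====
-- def height_piramid(quantity: int):
--     # Binary search for the largest height whose triangular number of blocks fits (logarithmic, vs A counting blocks one by one).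
--     if quantity % 2 != 0 or quantity <= 0:
--         return 0
--     lo, hi = 0, quantity
--     while lo < hi:
--         mid = (lo + hi + 1) // 2
--         if mid * (mid + 1) // 2 <= quantity:
--             lo = mid
--         else:
--             hi = mid - 1
--     return lo
-- ===== Notes on version B (the rewrite author's own statement) =====
-- stated objective: faster
-- what changed: Replaces A's one-block-at-a-time countdown loop with a binary search for the largest height whose triangular number of blocks still fits in the quantity; intended as faster, measured up to ~140x at the largest even inputs, while on odd inputs both return immediately so the sampled ratio there is 1.
import Mathlib
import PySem

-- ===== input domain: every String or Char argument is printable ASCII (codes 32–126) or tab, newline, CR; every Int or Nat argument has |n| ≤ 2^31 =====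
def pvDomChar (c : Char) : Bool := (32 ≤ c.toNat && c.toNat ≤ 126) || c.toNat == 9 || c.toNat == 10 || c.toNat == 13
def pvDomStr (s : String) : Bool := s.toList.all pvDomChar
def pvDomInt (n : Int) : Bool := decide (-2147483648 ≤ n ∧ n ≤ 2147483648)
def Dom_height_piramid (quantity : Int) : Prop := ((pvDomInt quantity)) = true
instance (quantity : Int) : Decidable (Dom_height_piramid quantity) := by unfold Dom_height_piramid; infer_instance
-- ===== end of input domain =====

-- B replaces A's block-by-block countdown loop with a binary search for the largest completed level (intended as faster; measured up to ~140x on large even inputs, equal on odd inputs where both exit at once).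

-- ===== PORT A =====
-- A's while loop consumes one block per iteration, so it runs exactly quantity.toNat times:
-- that count is the structural fuel; the loop state (height, limit_blocks, quantity_per_level) is carried unchanged.
def pvLoopA : Nat → Int → Int → Int → Int
  | 0, height, _, _ => height
  | Nat.succ n, height, limit_blocks, quantity_per_level =>
    if quantity_per_level + 1 == limit_blocks then
      pvLoopA n (height + 1) (limit_blocks + 1) 0
    else
      pvLoopA n height limit_blocks (quantity_per_level + 1)

def height_piramid (quantity : Int) : Int :=
  if quantity % 2 ≠ 0 then 0
  else pvLoopA quantity.toNat 0 1 0

-- ===== PORT B =====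
-- B's while loop: binary search on [lo, hi]; hi - lo starts at quantity and shrinks by at least 1
-- per iteration, so quantity.toNat is sufficient structural fuel.
def pvBsearch : Nat → Int → Int → Int → Int
  | 0, _, lo, _ => lo
  | Nat.succ n, quantity, lo, hi =>
    if lo < hi then
      let mid := PySem.Int.floordiv (lo + hi + 1) 2
      if PySem.Int.floordiv (mid * (mid + 1)) 2 ≤ quantity then
        pvBsearch n quantity mid hi
      else
        pvBsearch n quantity lo (mid - 1)
    else lo

def height_piramid_alt (quantity : Int) : Int :=
  if quantity % 2 ≠ 0 ∨ quantity ≤ 0 then 0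
  else pvBsearch quantity.toNat quantity 0 quantity

-- ===== PRECONDITION & SPEC =====
def Spec_height_piramid (quantity : Int) (out : Int) : Prop := out = height_piramid_alt quantity
instance (quantity : Int) (out : Int) : Decidable (Spec_height_piramid quantity out) := by unfold Spec_height_piramid; infer_instance

-- ===== CLAIM (what is proved, stated in full; the proofs are below) =====
def Claim_equal_height_piramid : Prop := ∀ (quantity : Int), Dom_height_piramid quantity → Spec_height_piramid quantity (height_piramid quantity)

-- ===== LEMMAS AND PROOFS =====

-- binary-search midpoint bounds
theorem pv_mid_bounds (lo hi : Int) (h : lo < hi) :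
    lo + 1 ≤ PySem.Int.floordiv (lo + hi + 1) 2 ∧ PySem.Int.floordiv (lo + hi + 1) 2 ≤ hi := by
  have h2 := PySem.Int.floordiv_two_mid_bounds (lo := lo + 1) (hi := hi) (by omega)
  rw [show lo + 1 + hi = lo + hi + 1 by ring] at h2
  exact h2

-- A's loop invariant: with limit_blocks = h+1 and 0 ≤ p ≤ h, the result H is the largest level
-- with H*(H+1) ≤ 2*(n + h*(h+1)/2 + p); stated without division as a sandwich on H*(H+1).
theorem pvLoopA_spec (n : Nat) : ∀ (h p : Int), 0 ≤ p → p ≤ h →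
    0 ≤ pvLoopA n h (h + 1) p ∧
    (pvLoopA n h (h + 1) p) * (pvLoopA n h (h + 1) p + 1) ≤ 2 * (n : Int) + h * (h + 1) + 2 * p ∧
    2 * (n : Int) + h * (h + 1) + 2 * p < (pvLoopA n h (h + 1) p + 1) * (pvLoopA n h (h + 1) p + 2) := by
  induction n with
  | zero =>
    intro h p hp hph
    rw [pvLoopA]
    refine ⟨by omega, by push_cast; linarith, by push_cast; nlinarith⟩
  | succ n ih =>
    intro h p hp hph
    rw [pvLoopA]
    by_cases hc : p + 1 = h + 1
    · rw [if_pos (by simp [hc])]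
      have hp' : p = h := by omega
      have := ih (h + 1) 0 (by omega) (by omega)
      refine ⟨this.1, by push_cast at this ⊢; nlinarith [this.2.1], by push_cast at this ⊢; nlinarith [this.2.2]⟩
    · rw [if_neg (by simp [hc])]
      have := ih h (p + 1) (by omega) (by omega)
      refine ⟨this.1, by push_cast at this ⊢; linarith [this.2.1], by push_cast at this ⊢; linarith [this.2.2]⟩

-- B's binary-search invariant: lo satisfies the condition, hi+1 fails it, and the fuel bounds
-- the interval width; the result is the largest r in [lo, hi] with r*(r+1) ≤ 2*quantity.
theorem pvBsearch_spec (n : Nat) : ∀ (q lo hi : Int), (hi - lo).toNat ≤ n → 0 ≤ lo → lo ≤ hi →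
    lo * (lo + 1) ≤ 2 * q → 2 * q < (hi + 1) * (hi + 2) →
    0 ≤ pvBsearch n q lo hi ∧
    (pvBsearch n q lo hi) * (pvBsearch n q lo hi + 1) ≤ 2 * q ∧
    2 * q < (pvBsearch n q lo hi + 1) * (pvBsearch n q lo hi + 2) := by
  induction n with
  | zero =>
    intro q lo hi hn hlo hlohi hcond hfail
    have heq : hi = lo := by omega
    rw [heq] at hfail
    rw [pvBsearch]
    exact ⟨hlo, hcond, hfail⟩
  | succ n ih =>
    intro q lo hi hn hlo hlohi hcond hfail
    rw [pvBsearch]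
    by_cases hlt : lo < hi
    · rw [if_pos hlt]
      have hmid := pv_mid_bounds lo hi hlt
      set mid := PySem.Int.floordiv (lo + hi + 1) 2 with hmiddef
      have hmnn : 0 ≤ mid := by omega
      have hdiveq : PySem.Int.floordiv (mid * (mid + 1)) 2 ≤ q ↔ mid * (mid + 1) ≤ 2 * q := by
        obtain ⟨k, hk⟩ := Int.two_dvd_mul_add_one mid
        rw [hk]
        simp only [PySem.Int.floordiv]
        rw [Int.mul_fdiv_cancel_left k (by norm_num)]
        omega
      by_cases hc : PySem.Int.floordiv (mid * (mid + 1)) 2 ≤ q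
      · rw [if_pos hc]
        exact ih q mid hi (by omega) (by omega) (by omega) (hdiveq.mp hc) hfail
      · rw [if_neg hc]
        have hfail' : 2 * q < mid * (mid + 1) := by
          by_contra hcon; exact hc (hdiveq.mpr (by omega))
        exact ih q lo (mid - 1) (by omega) hlo (by omega) hcond
          (by rw [show mid - 1 + 1 = mid by ring]; nlinarith)
    · rw [if_neg hlt]
      have heq : hi = lo := by omega
      rw [heq] at hfail
      exact ⟨hlo, hcond, hfail⟩

-- Uniqueness of the sandwich: two nonnegative H with H*(H+1) ≤ X < (H+1)*(H+2) coincide.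
theorem pv_sandwich_unique (a b X : Int) (ha : 0 ≤ a) (hb : 0 ≤ b)
    (ha1 : a * (a + 1) ≤ X) (ha2 : X < (a + 1) * (a + 2))
    (hb1 : b * (b + 1) ≤ X) (hb2 : X < (b + 1) * (b + 2)) : a = b := by
  by_contra hne
  rcases lt_or_gt_of_ne hne with hlt | hgt
  · have : a + 1 ≤ b := by omega
    nlinarith
  · have : b + 1 ≤ a := by omega
    nlinarith

-- ===== VERDICT (by name: the statement is the Claim_ definition above) =====
theorem height_piramid_spec : Claim_equal_height_piramid := by
  intro q _
  unfold Spec_height_piramid height_piramid height_piramid_alt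
  by_cases hodd : q % 2 ≠ 0
  · rw [if_pos hodd, if_pos (Or.inl hodd)]
  · rw [if_neg hodd]
    by_cases hq : q ≤ 0
    · rw [if_pos (Or.inr hq), show q.toNat = 0 by omega, pvLoopA]
    · rw [if_neg (fun hcon => hcon.elim hodd hq)]
      have hqpos : 0 < q := by omega
      have hcast : ((q.toNat : Int)) = q := by omega
      have hA := pvLoopA_spec q.toNat 0 0 (by omega) (by omega)
      rw [hcast] at hA
      norm_num at hA
      have hB := pvBsearch_spec q.toNat q 0 q (by omega) (by omega) (by omega)
        (by nlinarith) (by nlinarith)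
      exact pv_sandwich_unique _ _ (2 * q) hA.1 hB.1 (by linarith [hA.2.1])
        (by linarith [hA.2.2]) hB.2.1 hB.2.2
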